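-- pv_equiv track=rewrite | github.com/ASSERT-KTH/Mokav | experiments/c4b/BADTI/iteration-1-sample-100-temp-1/generated_tests/2555/22225/temp_acc_qb.py | patched_func
-- ===== SOURCE A (Python) =====
-- def patched_func(*args):
-- 	global_list = []
--
-- 	x = args[0]
-- 	x = ' '.join(x)
-- 	x = x.split()
-- 	y = 0
-- 	na = 8
-- 	suma = 0
-- 	mensaje = 'NO'
-- 	for s in range((len(x) - 6)):
-- 	    for m in range((s + 1), (s + 7)):
-- 	        if (x[s] != x[m]):
-- 	            break
-- 	        suma = (suma + 1)
-- 	        if (suma == 6):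
-- 	            break
-- 	    if (suma == 6):
-- 	        mensaje = 'YES'
-- 	        break
-- 	    suma = 0
-- 	global_list.append(mensaje)
-- 	return global_list
-- ===== SOURCE B (Python) =====
-- def patched_func(*args):
--     global_list = []
--     x = args[0]
--     x = ' '.join(x)
--     x = x.split()
--     mensaje = 'NO'
--     count = 1
--     for i in range(1, len(x)):
--         count = count + 1 if x[i] == x[i - 1] else 1
--         if count >= 7:
--             mensaje = 'YES'
--             break
--     global_list.append(mensaje)
--     return global_list
-- ===== Notes on version B (the rewrite author's own statement) =====
-- stated objective: simpler
-- what changed: Replaces A's nested loops (every window start, inner 6-comparison loop with a suma counter) by a single linear pass maintaining a run-length counter that declares YES on reaching 7.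
import Mathlib
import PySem

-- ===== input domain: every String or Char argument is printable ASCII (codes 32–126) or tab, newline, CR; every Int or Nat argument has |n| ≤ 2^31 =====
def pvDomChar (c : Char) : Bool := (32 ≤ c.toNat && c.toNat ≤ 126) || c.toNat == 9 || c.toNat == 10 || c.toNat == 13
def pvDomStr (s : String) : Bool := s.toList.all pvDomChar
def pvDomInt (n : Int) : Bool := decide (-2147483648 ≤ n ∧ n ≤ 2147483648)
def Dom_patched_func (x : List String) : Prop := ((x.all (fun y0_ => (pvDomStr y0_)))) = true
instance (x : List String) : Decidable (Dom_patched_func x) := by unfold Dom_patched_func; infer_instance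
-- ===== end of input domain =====

-- B replaces A's nested window scan (every start position, inner 6-comparison loop) by a single
-- linear pass with a run-length counter.

-- ===== PORT A =====
-- inner 'for m in range(s+1, s+7)' loop carrying suma, with both breaks
def pfInner (x : List String) (s m stop suma : Nat) : Nat :=
  if m < stop then
    if x.getD s "" ≠ x.getD m "" then suma
    else
      if suma + 1 = 6 then suma + 1
      else pfInner x s (m + 1) stop (suma + 1)
  else suma
termination_by stop - m

-- outer 'for s in range(len(x) - 6)' loop (suma is reset to 0 before each iteration)
def pfOuter (x : List String) (s : Nat) : String :=
  if s < x.length - 6 then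
    if pfInner x s (s + 1) (s + 7) 0 = 6 then "YES" else pfOuter x (s + 1)
  else "NO"
termination_by (x.length - 6) - s

def patched_func (x : List String) : List String :=
  let toks := PySem.Str.split₀ (PySem.Str.join " " x)
  [pfOuter toks 0]

-- ===== PORT B =====
-- single pass 'for i in range(1, len(x))' with a run-length counter, break at 7
def pfScan (x : List String) (i count : Nat) : String :=
  if i < x.length then
    let c := if x.getD i "" = x.getD (i - 1) "" then count + 1 else 1
    if 7 ≤ c then "YES" else pfScan x (i + 1) c
  else "NO"
termination_by x.length - i

def patched_func_alt (x : List String) : List String :=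
  let toks := PySem.Str.split₀ (PySem.Str.join " " x)
  [pfScan toks 1 1]

-- ===== PRECONDITION & SPEC =====
def Spec_patched_func (x : List String) (out : List String) : Prop := out = patched_func_alt x
instance (x : List String) (out : List String) : Decidable (Spec_patched_func x out) := by unfold Spec_patched_func; infer_instance

-- ===== CLAIM (what is proved, stated in full; the proofs are below) =====
def Claim_equal_patched_func : Prop := ∀ (x : List String), Dom_patched_func x → Spec_patched_func x (patched_func x)

-- ===== LEMMAS AND PROOFS =====

-- unfolding lemmas (zeta-expanded right-hand sides)
theorem pfOuter_eq (x : List String) (s : Nat) :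
    pfOuter x s = if s < x.length - 6 then
      (if pfInner x s (s + 1) (s + 7) 0 = 6 then "YES" else pfOuter x (s + 1))
    else "NO" := by
  rw [pfOuter]

theorem pfScan_eq (x : List String) (i count : Nat) :
    pfScan x i count = if i < x.length then
      (if 7 ≤ (if x.getD i "" = x.getD (i - 1) "" then count + 1 else 1) then "YES"
       else pfScan x (i + 1) (if x.getD i "" = x.getD (i - 1) "" then count + 1 else 1))
    else "NO" := by
  rw [pfScan]

-- length of the run of equal tokens ending at index j (via getD, total)
def runlen (x : List String) : Nat → Nat
  | 0 => 1
  | j + 1 => if x.getD (j + 1) "" = x.getD j "" then runlen x j + 1 else 1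

theorem runlen_pos (x : List String) (j : Nat) : 1 ≤ runlen x j := by
  cases j with
  | zero => simp [runlen]
  | succ j => rw [runlen]; split <;> omega

theorem runlen_le (x : List String) (j : Nat) : runlen x j ≤ j + 1 := by
  induction j with
  | zero => simp [runlen]
  | succ j ih => rw [runlen]; split <;> omega

theorem runlen_ge_iff (x : List String) (s : Nat) :
    ∀ k, (k + 1 ≤ runlen x (s + k) ↔ ∀ i, i < k → x.getD (s + 1 + i) "" = x.getD (s + i) "") := by
  intro k
  induction k with
  | zero =>
    constructor
    · intro _ i hi; omega
    · intro _; exact runlen_pos x (s + 0)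
  | succ k ih =>
    rw [show s + (k + 1) = s + k + 1 from by omega, runlen]
    by_cases he : x.getD (s + k + 1) "" = x.getD (s + k) ""
    · rw [if_pos he]
      constructor
      · intro h i hi
        rcases (by omega : i < k ∨ i = k) with hi' | hi'
        · exact ih.mp (by omega) i hi'
        · subst hi'
          rw [show s + 1 + i = s + i + 1 from by omega]
          exact he
      · intro h
        have h1 : k + 1 ≤ runlen x (s + k) := ih.mpr (fun i hi => h i (by omega))
        omega
    · rw [if_neg he]
      constructor
      · intro h; omega
      · intro h
        exfalso
        have := h k (by omega)
        rw [show s + 1 + k = s + k + 1 from by omega] at this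
        exact he this
theorem runlen_ge7 (x : List String) (s : Nat) :
    7 ≤ runlen x (s + 6) ↔ ∀ i, i < 6 → x.getD (s + 1 + i) "" = x.getD (s + i) "" :=
  runlen_ge_iff x s 6

-- chaining step equalities to/from the base of the window
theorem chain_base (x : List String) (s : Nat)
    (h : ∀ i, i < 6 → x.getD (s + 1 + i) "" = x.getD (s + i) "") :
    ∀ i, i < 6 → x.getD (s + 1 + i) "" = x.getD s "" := by
  intro i
  induction i with
  | zero => intro _; simpa using h 0 (by omega)
  | succ n ih =>
    intro hn
    have h1 := h (n + 1) hn
    rw [show s + (n + 1) = s + 1 + n from by omega] at h1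
    rw [h1]
    exact ih (by omega)

theorem chain_step (x : List String) (s : Nat)
    (h : ∀ i, i < 6 → x.getD (s + 1 + i) "" = x.getD s "") :
    ∀ i, i < 6 → x.getD (s + 1 + i) "" = x.getD (s + i) "" := by
  intro i hi
  cases i with
  | zero => simpa using h 0 hi
  | succ n =>
    rw [h (n + 1) hi, show s + (n + 1) = s + 1 + n from by omega, h n (by omega)]

-- inner-loop characterization: starting at m = s+1+j with suma = j, result 6 ↔ remaining comparisons succeed
theorem pfInner_char (x : List String) :
    ∀ f j s, j + f = 6 →
      (pfInner x s (s + 1 + j) (s + 7) j = 6 ↔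
        ∀ i, j ≤ i → i < 6 → x.getD (s + 1 + i) "" = x.getD s "") := by
  intro f
  induction f with
  | zero =>
    intro j s hj
    have hj6 : j = 6 := by omega
    subst hj6
    rw [pfInner, if_neg (by omega : ¬ (s + 1 + 6 < s + 7))]
    constructor
    · intro _ i h1 h2; omega
    · intro _; rfl
  | succ f ih =>
    intro j s hj
    rw [pfInner, if_pos (by omega : s + 1 + j < s + 7)]
    by_cases he : x.getD s "" = x.getD (s + 1 + j) ""
    · rw [if_neg (not_not_intro he)]
      by_cases h6 : j + 1 = 6
      · rw [if_pos h6]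
        constructor
        · intro _ i h1 h2
          have hij : i = j := by omega
          subst hij
          exact he.symm
        · intro _; exact h6
      · rw [if_neg h6]
        have hrec := ih (j + 1) s (by omega)
        rw [show s + 1 + j + 1 = s + 1 + (j + 1) from by omega, hrec]
        constructor
        · intro h i h1 h2
          rcases (by omega : i = j ∨ j + 1 ≤ i) with h' | h'
          · subst h'; exact he.symm
          · exact h i h' h2
        · intro h i h1 h2
          exact h i (by omega) h2
    · rw [if_pos he]
      constructor
      · intro h; exact absurd h (by omega)
      · intro h
        exfalso
        exact he ((h j (le_refl j) (by omega)).symm)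

-- outer loop ↔ some window of 7 equal tokens starting at j ≥ s (expressed via runlen)
theorem pfOuter_char (x : List String) :
    ∀ f s, (x.length - 6) - s = f →
      (pfOuter x s = "YES" ↔ ∃ j, s ≤ j ∧ j < x.length - 6 ∧ 7 ≤ runlen x (j + 6)) := by
  intro f
  induction f with
  | zero =>
    intro s hs
    rw [pfOuter_eq, if_neg (by omega)]
    constructor
    · intro h; simp at h
    · rintro ⟨j, h1, h2, _⟩; omega
  | succ f ih =>
    intro s hs
    rw [pfOuter_eq, if_pos (by omega)]
    have hIC := pfInner_char x 6 0 s (by omega)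
    rw [show s + 1 + 0 = s + 1 from rfl] at hIC
    have hin : pfInner x s (s + 1) (s + 7) 0 = 6 ↔ 7 ≤ runlen x (s + 6) := by
      rw [hIC, runlen_ge7]
      constructor
      · intro h; exact chain_step x s (fun i hi => h i (by omega) hi)
      · intro h i _ hi; exact chain_base x s h i hi
    by_cases h6 : pfInner x s (s + 1) (s + 7) 0 = 6
    · rw [if_pos h6]
      constructor
      · intro _; exact ⟨s, le_refl s, by omega, hin.mp h6⟩
      · intro _; rfl
    · rw [if_neg h6, ih (s + 1) (by omega)]
      constructor
      · rintro ⟨j, h1, h2, h3⟩; exact ⟨j, by omega, h2, h3⟩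
      · rintro ⟨j, h1, h2, h3⟩
        rcases (by omega : j = s ∨ s + 1 ≤ j) with h' | h'
        · subst h'; exact absurd (hin.mpr h3) h6
        · exact ⟨j, h', h2, h3⟩

-- scan-loop invariant: count is the run length ending at i-1
theorem pfScan_char (x : List String) :
    ∀ f i count, x.length - i = f → 1 ≤ i → count = runlen x (i - 1) →
      (pfScan x i count = "YES" ↔ ∃ j, i ≤ j ∧ j < x.length ∧ 7 ≤ runlen x j) := by
  intro f
  induction f with
  | zero =>
    intro i count hf _ _
    rw [pfScan_eq, if_neg (by omega)]
    constructor
    · intro h; simp at h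
    · rintro ⟨j, h1, h2, _⟩; omega
  | succ f ih =>
    intro i count hf hi hc
    rw [pfScan_eq, if_pos (by omega)]
    have e : i - 1 + 1 = i := by omega
    have hr : runlen x i = if x.getD i "" = x.getD (i - 1) "" then runlen x (i - 1) + 1 else 1 := by
      conv_lhs => rw [← e]
      rw [runlen, e]
    have hrun : (if x.getD i "" = x.getD (i - 1) "" then count + 1 else 1) = runlen x i := by
      rw [hr, hc]
    rw [hrun]
    by_cases h7 : 7 ≤ runlen x i
    · rw [if_pos h7]
      constructor
      · intro _; exact ⟨i, le_refl i, by omega, h7⟩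
      · intro _; rfl
    · rw [if_neg h7, ih (i + 1) (runlen x i) (by omega) (by omega) (by rw [Nat.add_sub_cancel])]
      constructor
      · rintro ⟨j, h1, h2, h3⟩; exact ⟨j, by omega, h2, h3⟩
      · rintro ⟨j, h1, h2, h3⟩
        rcases (by omega : j = i ∨ i + 1 ≤ j) with h' | h'
        · subst h'; exact absurd h3 h7
        · exact ⟨j, h', h2, h3⟩

theorem pfOuter_cases (x : List String) : ∀ f s, (x.length - 6) - s = f →
    pfOuter x s = "YES" ∨ pfOuter x s = "NO" := by
  intro f
  induction f with
  | zero => intro s hs; rw [pfOuter_eq, if_neg (by omega)]; right; rfl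
  | succ f ih =>
    intro s hs
    rw [pfOuter_eq, if_pos (by omega)]
    split
    · left; rfl
    · exact ih (s + 1) (by omega)

theorem pfScan_cases (x : List String) : ∀ f i count, x.length - i = f →
    pfScan x i count = "YES" ∨ pfScan x i count = "NO" := by
  intro f
  induction f with
  | zero => intro i count hf; rw [pfScan_eq, if_neg (by omega)]; right; rfl
  | succ f ih =>
    intro i count hf
    rw [pfScan_eq, if_pos (by omega)]
    by_cases h : 7 ≤ (if x.getD i "" = x.getD (i - 1) "" then count + 1 else 1)
    · rw [if_pos h]; left; rfl
    · rw [if_neg h]; exact ih (i + 1) _ (by omega)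

theorem main_eq (l : List String) : pfOuter l 0 = pfScan l 1 1 := by
  have hA := pfOuter_char l ((l.length - 6) - 0) 0 rfl
  have hB := pfScan_char l (l.length - 1) 1 1 rfl (le_refl 1) rfl
  have key : pfOuter l 0 = "YES" ↔ pfScan l 1 1 = "YES" := by
    rw [hA, hB]
    constructor
    · rintro ⟨j, _, h2, h3⟩; exact ⟨j + 6, by omega, by omega, h3⟩
    · rintro ⟨j, h1, h2, h3⟩
      have h6 : 6 ≤ j := by have := runlen_le l j; omega
      refine ⟨j - 6, by omega, by omega, ?_⟩
      rw [show j - 6 + 6 = j from by omega]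
      exact h3
  rcases pfOuter_cases l ((l.length - 6) - 0) 0 rfl with hA' | hA' <;>
    rcases pfScan_cases l (l.length - 1) 1 1 rfl with hB' | hB'
  · rw [hA', hB']
  · exfalso
    have := key.mp hA'
    rw [hB'] at this
    simp at this
  · exfalso
    have := key.mpr hB'
    rw [hA'] at this
    simp at this
  · rw [hA', hB']

-- ===== VERDICT (by name: the statement is the Claim_ definition above) =====
theorem patched_func_spec : Claim_equal_patched_func := by
  intro x _
  unfold Spec_patched_func
  show [pfOuter (PySem.Str.split₀ (PySem.Str.join " " x)) 0]
     = [pfScan (PySem.Str.split₀ (PySem.Str.join " " x)) 1 1]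
  rw [main_eq]
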